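-- pv_equiv track=rewrite | github.com/migeee8/DigitalMediaTechnologyBase_2023spring | lab2/lab2_2.py | calEnergy
-- ===== SOURCE A (Python) =====
-- def calEnergy(wave_data):
--     energy = [] #数组存储每一帧的能量值
--     sum = 0
--     frameSize = 256
--     #每256个采样点为一帧，能量取帧内所有值的平方和
--     for i in range(len(wave_data)):
--         sum = sum + (wave_data[i] * wave_data[i])
--         if (i+1) % frameSize == 0:
--             energy.append(sum)
--             sum=0 #清零
--         elif i == len(wave_data) - 1 : #音频数据末端处理
--             energy.append(sum)
--     return energy
-- ===== SOURCE B (Python) =====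
-- def calEnergy(wave_data):
--     energy = []
--     n = len(wave_data)
--     start = 0
--     while start < n:
--         energy.append(sum(x * x for x in wave_data[start:start + 256]))
--         start += 256
--     return energy
-- ===== Notes on version B (the rewrite author's own statement) =====
-- stated objective: simpler
-- what changed: Replaced the flat per-sample loop with its running accumulator, modulo frame-boundary test and explicit last-index branch by a stride-256 loop that sums the squares of each slice, handling whole and partial frames uniformly.
import Mathlib
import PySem

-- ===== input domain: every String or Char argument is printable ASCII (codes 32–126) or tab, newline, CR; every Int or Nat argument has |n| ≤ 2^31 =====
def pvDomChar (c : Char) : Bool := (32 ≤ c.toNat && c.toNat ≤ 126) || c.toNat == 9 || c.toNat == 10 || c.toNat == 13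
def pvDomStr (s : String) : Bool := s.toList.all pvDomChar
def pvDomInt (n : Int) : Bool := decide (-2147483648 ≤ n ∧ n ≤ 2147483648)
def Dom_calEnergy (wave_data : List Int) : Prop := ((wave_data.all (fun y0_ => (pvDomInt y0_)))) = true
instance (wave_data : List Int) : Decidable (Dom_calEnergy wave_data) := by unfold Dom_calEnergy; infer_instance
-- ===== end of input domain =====

-- B replaces the flat per-sample loop with modulo boundary test and last-index branch by a
-- stride-256 loop summing squares of each slice (simpler decomposition, same cost).

-- ===== PORT A =====
-- literal port of A: fold over range(len(wave_data)) with state (energy, sum)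
def calEnergy (wave_data : List Int) : List Int :=
  let n : Int := wave_data.length
  ((PySem.List.pyRange 0 n 1).foldl
    (fun (st : List Int × Int) (i : Int) =>
      let s := st.2 + PySem.List.pyGetD wave_data i 0 * PySem.List.pyGetD wave_data i 0
      if PySem.Int.mod (i + 1) 256 = 0 then (st.1 ++ [s], 0)
      else if i = n - 1 then (st.1 ++ [s], s)
      else (st.1, s))
    ([], 0)).1

-- ===== PORT B =====
-- port of B's while loop: start strides by 256, each frame is the slice [start, start+256)
def calEnergyGo (wave_data : List Int) (start : Nat) : List Int :=
  if h : start < wave_data.length then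
    ((PySem.List.slice wave_data (some (start : Int)) (some ((start : Int) + (256 : Nat)))).map
        (fun x => x * x)).sum :: calEnergyGo wave_data (start + 256)
  else []
termination_by wave_data.length - start
decreasing_by omega

def calEnergy_alt (wave_data : List Int) : List Int :=
  calEnergyGo wave_data 0

-- ===== PRECONDITION & SPEC =====
def Spec_calEnergy (wave_data : List Int) (out : List Int) : Prop := out = calEnergy_alt wave_data
instance (wave_data : List Int) (out : List Int) : Decidable (Spec_calEnergy wave_data out) := by unfold Spec_calEnergy; infer_instance

-- ===== CLAIM (what is proved, stated in full; the proofs are below) =====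
def Claim_equal_calEnergy : Prop := ∀ (wave_data : List Int), Dom_calEnergy wave_data → Spec_calEnergy wave_data (calEnergy wave_data)

-- ===== LEMMAS AND PROOFS =====

-- sum of squares (proof-side abbreviation)
def sumsq (l : List Int) : Int := (l.map (fun x => x * x)).sum

@[simp] lemma sumsq_nil : sumsq [] = 0 := rfl
@[simp] lemma sumsq_cons (x : Int) (l : List Int) : sumsq (x :: l) = x * x + sumsq l := by
  simp [sumsq]

-- clean chunking recursion (what both sides compute)
def chunks (ys : List Int) : List Int :=
  if h : ys = [] then []
  else sumsq (ys.take 256) :: chunks (ys.drop 256)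
termination_by ys.length
decreasing_by
  have : ys.length ≠ 0 := fun hl => h (List.eq_nil_of_length_eq_zero hl)
  simp [List.length_drop]; omega

-- A's loop state machine: capacity c left in the current frame, partial sum s
def frames : Nat → Int → List Int → List Int
  | _, _, [] => []
  | c, s, x :: rest =>
    if c = 1 then (s + x * x) :: frames 256 0 rest
    else if rest = [] then [s + x * x]
    else frames (c - 1) (s + x * x) rest

-- A's fold body, named for the proofs
def stepA (w : List Int) (n : Int) (st : List Int × Int) (p : Int × Int) : List Int × Int :=
  let s := st.2 + p.2 * p.2
  if PySem.Int.mod (p.1 + 1) 256 = 0 then (st.1 ++ [s], 0)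
  else if p.1 = n - 1 then (st.1 ++ [s], s)
  else (st.1, s)

lemma calEnergy_eq_enumFold (w : List Int) :
    calEnergy w = ((PySem.List.enumerate w 0).foldl (stepA w (w.length : Int)) ([], 0)).1 := by
  rw [PySem.List.enumerate_eq_map_pyRange (d := 0), List.foldl_map]
  rfl

@[simp] lemma chunks_nil : chunks [] = [] := by rw [chunks]; simp

lemma chunks_ne (ys : List Int) (h : ys ≠ []) :
    chunks ys = sumsq (ys.take 256) :: chunks (ys.drop 256) := by
  rw [chunks]; simp [h]

lemma foldA (w : List Int) (n : Int) :
    ∀ (xs : List Int) (i0 : Nat) (s : Int) (acc : List Int),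
      n = (i0 : Int) + xs.length →
      ((PySem.List.enumerate xs (i0 : Int)).foldl (stepA w n) (acc, s)).1
        = acc ++ frames (256 - i0 % 256) s xs := by
  intro xs
  induction xs with
  | nil => intro i0 s acc _; simp [PySem.List.enumerate_nil, frames]
  | cons x rest ih =>
    intro i0 s acc hn
    rw [List.length_cons] at hn
    push_cast at hn
    rw [PySem.List.enumerate_cons]
    have hmod : PySem.Int.mod ((i0 : Int) + 1) 256 = (((i0 + 1) % 256 : Nat) : Int) := by
      rw [PySem.Int.mod_eq_emod_of_pos (by norm_num : (0 : Int) < 256)]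
      push_cast; omega
    by_cases h1 : i0 % 256 = 255
    · -- frame boundary: capacity is 1
      have hcond : PySem.Int.mod ((i0 : Int) + 1) 256 = 0 := by rw [hmod]; omega
      have hst : stepA w n (acc, s) ((i0 : Int), x) = (acc ++ [s + x * x], 0) := by
        simp only [stepA]
        rw [if_pos hcond]
      rw [List.foldl_cons, hst]
      have hih := ih (i0 + 1) 0 (acc ++ [s + x * x]) (by push_cast; omega)
      push_cast at hih
      rw [hih]
      have hc : 256 - i0 % 256 = 1 := by omega
      have hc' : 256 - (i0 + 1) % 256 = 256 := by omega
      rw [hc, hc', frames]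
      simp
    · have hcond : ¬ PySem.Int.mod ((i0 : Int) + 1) 256 = 0 := by
        rw [hmod]
        have h' : (i0 + 1) % 256 ≠ 0 := by omega
        exact_mod_cast h'
      have hc1 : ¬ (256 - i0 % 256 = 1) := by omega
      by_cases h2 : rest = []
      · -- last element of the data
        subst h2
        have hlast : (i0 : Int) = n - 1 := by simp at hn; omega
        have hst : stepA w n (acc, s) ((i0 : Int), x) = (acc ++ [s + x * x], s + x * x) := by
          simp only [stepA]
          rw [if_neg hcond, if_pos hlast]
        rw [List.foldl_cons, hst, frames]
        rw [if_neg hc1, if_pos rfl]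
        simp [PySem.List.enumerate_nil]
      · -- middle of a frame
        have hlast : ¬ ((i0 : Int) = n - 1) := by
          have h' : rest.length ≠ 0 := fun hl => h2 (List.eq_nil_of_length_eq_zero hl)
          omega
        have hst : stepA w n (acc, s) ((i0 : Int), x) = (acc, s + x * x) := by
          simp only [stepA]
          rw [if_neg hcond, if_neg hlast]
        rw [List.foldl_cons, hst]
        have hih := ih (i0 + 1) (s + x * x) acc (by push_cast; omega)
        push_cast at hih
        rw [hih]
        have hc' : 256 - (i0 + 1) % 256 = 256 - i0 % 256 - 1 := by omega
        rw [hc', frames]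
        rw [if_neg hc1, if_neg h2]

-- frames agrees with the chunk recursion
lemma frames_chunks :
    ∀ (xs : List Int) (c : Nat) (s : Int), 1 ≤ c → c ≤ 256 →
      frames c s xs =
        if xs = [] then [] else (s + sumsq (xs.take c)) :: chunks (xs.drop c) := by
  intro xs
  induction xs with
  | nil => intro c s _ _; simp [frames]
  | cons x rest ih =>
    intro c s hc1 hc2
    by_cases h1 : c = 1
    · subst h1
      rw [frames, if_pos rfl, ih 256 0 (by omega) (by omega)]
      by_cases h2 : rest = []
      · simp [h2]
      · rw [show List.drop 1 (x :: rest) = rest from rfl, chunks_ne rest h2]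
        simp [h2]
    · by_cases h2 : rest = []
      · subst h2
        have ht : List.take c [x] = [x] := List.take_of_length_le (by simp; omega)
        have hd : List.drop c [x] = [] := List.drop_eq_nil_of_le (by simp; omega)
        rw [frames]
        rw [if_neg h1, if_pos rfl]
        simp [ht, hd]
      · rw [frames]
        rw [if_neg h1, if_neg h2, ih (c - 1) (s + x * x) (by omega) (by omega)]
        have hct : (x :: rest).take c = x :: rest.take (c - 1) := by
          cases c with
          | zero => omega
          | succ m => simp
        have hcd : (x :: rest).drop c = rest.drop (c - 1) := by
          cases c with
          | zero => omega
          | succ m => simp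
        simp [h2, hct, hcd, add_assoc]

-- B's stride loop agrees with the chunk recursion
lemma calEnergyGo_eq_chunks (w : List Int) :
    ∀ (start : Nat), calEnergyGo w start = chunks (w.drop start) := by
  intro start
  induction start using calEnergyGo.induct w with
  | case1 start h ih =>
    rw [calEnergyGo, dif_pos h]
    rw [chunks, dif_neg (by simp [List.drop_eq_nil_iff]; omega)]
    rw [ih]
    have hsl : PySem.List.slice w (some (start : Int)) (some ((start : Int) + (256 : Nat)))
        = (w.drop start).take 256 := PySem.List.slice_natCast_add w start 256
    rw [hsl, List.drop_drop]
    have : start + 256 = 256 + start := by omega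
    rw [this]
    rfl
  | case2 start h =>
    rw [calEnergyGo, dif_neg h]
    rw [chunks, dif_pos (by simp [List.drop_eq_nil_iff]; omega)]

-- ===== VERDICT (by name: the statement is the Claim_ definition above) =====
theorem calEnergy_spec : Claim_equal_calEnergy := by
  intro w _
  unfold Spec_calEnergy
  rw [calEnergy_eq_enumFold w]
  have h := foldA w (w.length : Int) w 0 0 [] (by push_cast; ring)
  push_cast at h
  norm_num at h
  rw [h, frames_chunks w 256 0 (by omega) (by omega)]
  unfold calEnergy_alt
  rw [calEnergyGo_eq_chunks w 0, List.drop_zero]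
  by_cases hw : w = []
  · simp [hw]
  · rw [chunks_ne w hw]
    simp [hw]
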